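-- pv_equiv track=rewrite | github.com/colinxy/ProjectEuler | Python/project_euler304.py | fib_incr
-- ===== SOURCE A (Python) =====
-- MOD = 1234567891011
--
-- def mat_mul(a, b):
--     a0, a1, a2, a3 = a
--     b0, b1, b2, b3 = b
--     return [
--         (a0*b0 + a1*b2) % MOD,
--         (a0*b1 + a1*b3) % MOD,
--         (a2*b0 + a3*b2) % MOD,
--         (a2*b1 + a3*b3) % MOD,
--     ]
--
-- def fib_matrix_exp_mod(n):
--     """
--     This function finds
--     ( 1  1 )^n
--     (      )
--     ( 1  0 )
--
--     Usage notes: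
--
--     ( F2 )   ( 1  1 ) ( F1 )
--     (    ) = (      ) (    )
--     ( F1 )   ( 1  0 ) ( F0 )
--
--     where F0 = 0, F1 = 1
--     then it follows that
--
--     ( F(n)   )   ( 1  1 )^(n-1) ( F1 )
--     (        ) = (      )       (    )
--     ( F(n-1) )   ( 1  0 )       ( F0 )
--
--     We can therefore find F(n) in log(n) time
--     """
--
--     base = [1, 1, 1, 0]
--
--     if n == 0:
--         return [1, 0, 0, 1]     # identity
--     if n == 1:
--         return base
--
--     half_exp = fib_matrix_exp_mod(n >> 1)
--     full_exp = mat_mul(half_exp, half_exp)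
--     if n & 1:
--         return mat_mul(full_exp, base)
--     return full_exp
--
-- def fib_incr(nums):
--     """
--     Precondition: nums is sorted increasing.
--
--     Best use when nums[0] is large, and each increment is small
--     """
--     fibs = []
--
--     matrix = fib_matrix_exp_mod(nums[0]-1)
--     fibs.append(matrix[0])
--     for i in range(1, len(nums)):
--         incr = nums[i] - nums[i-1]
--         matrix = mat_mul(fib_matrix_exp_mod(incr), matrix)
--         fibs.append(matrix[0])
--
--     return fibs
-- ===== SOURCE B (Python) =====
-- MOD = 1234567891011
--
-- def _fib_pair(n):
--     # returns (F(n) % MOD, F(n+1) % MOD) by fast doubling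
--     if n == 0:
--         return (0, 1)
--     a, b = _fib_pair(n >> 1)
--     c = a * (2 * b - a) % MOD
--     d = (a * a + b * b) % MOD
--     if n & 1:
--         return (d, (c + d) % MOD)
--     return (c, d)
--
-- def fib_incr(nums):
--     return [_fib_pair(n)[0] for n in nums]
-- ===== Notes on version B (the rewrite author's own statement) =====
-- stated objective: simpler
-- what changed: Replaces the carried 2x2-matrix product updated by matrix powers of each increment with an independent fast-doubling computation of (F(n), F(n+1)) mod MOD per element, with no running state.
import Mathlib
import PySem

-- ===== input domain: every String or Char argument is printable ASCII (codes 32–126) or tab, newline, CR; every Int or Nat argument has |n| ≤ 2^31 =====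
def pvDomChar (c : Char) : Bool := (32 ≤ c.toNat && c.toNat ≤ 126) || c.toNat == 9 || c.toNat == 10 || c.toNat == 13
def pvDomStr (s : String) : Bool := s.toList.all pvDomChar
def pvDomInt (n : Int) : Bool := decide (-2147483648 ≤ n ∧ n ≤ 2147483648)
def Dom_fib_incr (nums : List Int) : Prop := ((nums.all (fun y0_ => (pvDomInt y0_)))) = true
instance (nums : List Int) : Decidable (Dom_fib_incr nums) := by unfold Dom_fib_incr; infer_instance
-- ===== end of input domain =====

-- B recomputes each Fibonacci value independently by fast doubling instead of carrying a running
-- matrix product updated by matrix powers of the increments (simpler, no running state).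

def MOD : Int := 1234567891011

-- ===== PORT A =====

def mat_mul (a b : Int × Int × Int × Int) : Int × Int × Int × Int :=
  (PySem.Int.mod (a.1 * b.1 + a.2.1 * b.2.2.1) MOD,
   PySem.Int.mod (a.1 * b.2.1 + a.2.1 * b.2.2.2) MOD,
   PySem.Int.mod (a.2.2.1 * b.1 + a.2.2.2 * b.2.2.1) MOD,
   PySem.Int.mod (a.2.2.1 * b.2.1 + a.2.2.2 * b.2.2.2) MOD)

-- recursion of fib_matrix_exp_mod on the nonnegative arguments (n >> 1 = n / 2, n & 1 = n % 2 for n ≥ 0)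
def matExpNat (n : Nat) : Int × Int × Int × Int :=
  if n = 0 then (1, 0, 0, 1)
  else if n = 1 then (1, 1, 1, 0)
  else
    let half_exp := matExpNat (n / 2)
    let full_exp := mat_mul half_exp half_exp
    if n % 2 = 1 then mat_mul full_exp (1, 1, 1, 0) else full_exp
termination_by n
decreasing_by omega

-- on n < 0 the Python recursion never reaches a base case (RecursionError): excluded by Pre_;
-- the guard only makes the Lean function total
def fib_matrix_exp_mod (n : Int) : Int × Int × Int × Int :=
  if n < 0 then (1, 0, 0, 1) else matExpNat n.toNat

def fib_incr (nums : List Int) : List Int :=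
  match PySem.List.pyGet? nums 0 with
  | none => []  -- IndexError on empty nums: excluded by Pre_
  | some h0 =>
    let matrix := fib_matrix_exp_mod (h0 - 1)
    let st := (PySem.List.pyRange 1 (nums.length : Int) 1).foldl
      (fun (st : List Int × (Int × Int × Int × Int)) i =>
        let incr := PySem.List.pyGetD nums i 0 - PySem.List.pyGetD nums (i - 1) 0
        let m := mat_mul (fib_matrix_exp_mod incr) st.2
        (st.1 ++ [m.1], m))
      ([matrix.1], matrix)
    st.1

-- ===== PORT B =====

-- fast doubling: returns (F(n) % MOD, F(n+1) % MOD); n >> 1 = n / 2, n & 1 = n % 2 on Nat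
def fibPair (n : Nat) : Int × Int :=
  if n = 0 then (0, 1)
  else
    let p := fibPair (n / 2)
    let c := PySem.Int.mod (p.1 * (2 * p.2 - p.1)) MOD
    let d := PySem.Int.mod (p.1 * p.1 + p.2 * p.2) MOD
    if n % 2 = 1 then (d, PySem.Int.mod (c + d) MOD) else (c, d)
termination_by n
decreasing_by omega

-- on n < 0 the Python recursion never reaches the base case (RecursionError): such inputs are
-- outside Pre_; the guard only makes the Lean function total
def fibPairI (n : Int) : Int × Int :=
  if n < 0 then (0, 1) else fibPair n.toNat

def fib_incr_alt (nums : List Int) : List Int :=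
  nums.map (fun n => (fibPairI n).1)

-- ===== PRECONDITION & SPEC =====

-- A raises (IndexError / RecursionError) outside these inputs: nums must be nonempty, start at
-- an element ≥ 1 and be sorted nondecreasing; exactly the inputs on which A returns.
def Pre_fib_incr (nums : List Int) : Prop :=
  nums ≠ [] ∧ 1 ≤ nums.headI ∧ List.IsChain (· ≤ ·) nums
instance (nums : List Int) : Decidable (Pre_fib_incr nums) := by unfold Pre_fib_incr; infer_instance

def pvWitness_fib_incr : List Int := [1, 2, 5]

def Spec_fib_incr (nums : List Int) (out : List Int) : Prop := out = fib_incr_alt nums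
instance (nums : List Int) (out : List Int) : Decidable (Spec_fib_incr nums out) := by unfold Spec_fib_incr; infer_instance

-- ===== CLAIM (what is proved, stated in full; the proofs are below) =====
def Claim_equal_fib_incr : Prop := ∀ (nums : List Int), Dom_fib_incr nums → Pre_fib_incr nums → Spec_fib_incr nums (fib_incr nums)

-- ===== LEMMAS AND PROOFS =====

def fm (k : Nat) : Int := (Nat.fib k : Int) % MOD

def mform (k : Nat) : Int × Int × Int × Int :=
  (fm (k + 1), fm k, fm k, ((Nat.fib (k + 1) : Int) - (Nat.fib k : Int)) % MOD)

theorem MOD_pos : (0 : Int) < MOD := by unfold MOD; norm_num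

theorem pmod (x : Int) : PySem.Int.mod x MOD = x % MOD :=
  PySem.Int.mod_eq_emod_of_pos MOD_pos

theorem modeq_emod (x : Int) : x % MOD ≡ x [ZMOD MOD] :=
  Int.emod_emod_of_dvd x dvd_rfl

theorem mix (x y u v w : Int) (h : x * y + u * v = w) :
    (x % MOD * (y % MOD) + u % MOD * (v % MOD)) % MOD = w % MOD := by
  have := ((modeq_emod x).mul (modeq_emod y)).add ((modeq_emod u).mul (modeq_emod v))
  rw [h] at this
  exact this

theorem fib_key (a b : Nat) :
    ((Nat.fib (a + b) : Int)) =
      (Nat.fib (a + 1) : Int) * Nat.fib b + (Nat.fib a : Int) * Nat.fib (b + 1)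
        - (Nat.fib a : Int) * Nat.fib b := by
  cases b with
  | zero => simp
  | succ b =>
    have h1 : Nat.fib (a + b + 1) = Nat.fib a * Nat.fib b + Nat.fib (a + 1) * Nat.fib (b + 1) :=
      Nat.fib_add a b
    have h2 : Nat.fib (b + 2) = Nat.fib b + Nat.fib (b + 1) := Nat.fib_add_two
    have : a + (b + 1) = a + b + 1 := by omega
    rw [this]
    push_cast [h1, h2]
    ring

theorem fib_add_int (a b : Nat) :
    ((Nat.fib (a + b + 1) : Int)) = (Nat.fib a : Int) * Nat.fib b + (Nat.fib (a + 1) : Int) * Nat.fib (b + 1) := by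
  have := Nat.fib_add a b
  push_cast [this]
  ring

theorem mform_mul (a b : Nat) : mat_mul (mform a) (mform b) = mform (a + b) := by
  simp only [mat_mul, mform, fm, pmod]
  refine Prod.ext ?_ (Prod.ext ?_ (Prod.ext ?_ ?_)) <;> simp only
  · exact mix _ _ _ _ _ (by rw [fib_add_int a b]; ring)
  · exact mix _ _ _ _ _ (by rw [fib_key a b]; ring)
  · exact mix _ _ _ _ _ (by rw [fib_key a b]; ring)
  · refine mix _ _ _ _ _ ?_
    have h1 := fib_add_int a b
    have h2 := fib_key a b
    have : (Nat.fib a : Int) * Nat.fib b + ((Nat.fib (a+1) : Int) - Nat.fib a) * ((Nat.fib (b+1) : Int) - Nat.fib b)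
        = (Nat.fib (a + b + 1) : Int) - Nat.fib (a + b) := by rw [h1, h2]; ring
    exact this

theorem matExpNat_eq (n : Nat) : matExpNat n = mform n := by
  induction n using Nat.strong_induction_on with
  | _ n ih =>
    rw [matExpNat]
    by_cases h0 : n = 0
    · subst h0; norm_num [mform, fm, MOD, Nat.fib_one]
    · by_cases h1 : n = 1
      · subst h1; norm_num [mform, fm, MOD, Nat.fib_one, Nat.fib_two]
      · simp only [h0, h1, if_false]
        rw [ih (n / 2) (by omega), mform_mul]
        by_cases hodd : n % 2 = 1
        · rw [if_pos hodd]
          have hb : ((1:Int), (1:Int), (1:Int), (0:Int)) = mform 1 := by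
            norm_num [mform, fm, MOD, Nat.fib_one, Nat.fib_two]
          rw [hb, mform_mul]
          have e : n / 2 + n / 2 + 1 = n := by omega
          rw [e]
        · rw [if_neg hodd]
          have e : n / 2 + n / 2 = n := by omega
          rw [e]

theorem mix2 (x y w : Int) (h : x * (2 * y - x) = w) :
    x % MOD * (2 * (y % MOD) - x % MOD) % MOD = w % MOD := by
  have := (modeq_emod x).mul (((modeq_emod y).mul_left 2).sub (modeq_emod x))
  rw [h] at this
  exact this

theorem fibPair_eq (n : Nat) : fibPair n = (fm n, fm (n + 1)) := by
  induction n using Nat.strong_induction_on with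
  | _ n ih =>
    rw [fibPair]
    by_cases h0 : n = 0
    · subst h0; simp [fm, MOD]
    · simp only [h0, if_false]
      rw [ih (n / 2) (by omega)]
      set k := n / 2 with hk
      have hfle : Nat.fib k ≤ 2 * Nat.fib (k + 1) :=
        le_trans Nat.fib_le_fib_succ (by omega)
      have hc : (Nat.fib k : Int) * (2 * Nat.fib (k + 1) - Nat.fib k) = (Nat.fib (2 * k) : Int) := by
        rw [Nat.fib_two_mul]
        push_cast [hfle]
        ring
      have hd : (Nat.fib k : Int) * Nat.fib k + (Nat.fib (k + 1) : Int) * Nat.fib (k + 1)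
          = (Nat.fib (2 * k + 1) : Int) := by
        rw [Nat.fib_two_mul_add_one]
        push_cast
        ring
      have hc' : PySem.Int.mod (fm k * (2 * fm (k + 1) - fm k)) MOD = fm (2 * k) := by
        rw [pmod]; exact mix2 _ _ _ hc
      have hd' : PySem.Int.mod (fm k * fm k + fm (k + 1) * fm (k + 1)) MOD = fm (2 * k + 1) := by
        rw [pmod]; exact mix _ _ _ _ _ hd
      simp only [hc', hd']
      by_cases hodd : n % 2 = 1
      · have hsum : PySem.Int.mod (fm (2 * k) + fm (2 * k + 1)) MOD = fm (2 * k + 2) := by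
          rw [pmod]
          have hs : (Nat.fib (2 * k) : Int) + Nat.fib (2 * k + 1) = (Nat.fib (2 * k + 2) : Int) := by
            rw [Nat.fib_add_two]; push_cast; ring
          have := ((modeq_emod (Nat.fib (2 * k) : Int)).add (modeq_emod (Nat.fib (2 * k + 1) : Int)))
          rw [hs] at this
          exact this
        rw [if_pos hodd, hsum]
        have e1 : 2 * k + 1 = n := by omega
        have e2 : 2 * k + 2 = n + 1 := by omega
        rw [e1, e2]
      · rw [if_neg hodd]
        have e1 : 2 * k = n := by omega
        rw [e1]

theorem chain_head_le : ∀ (t : List Int) (h : Int), List.IsChain (· ≤ ·) (h :: t) →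
    ∀ x ∈ h :: t, h ≤ x := by
  intro t
  induction t with
  | nil =>
    intro h _ x hx
    simp only [List.mem_singleton] at hx
    simp [hx]
  | cons y t ih =>
    intro h hc x hx
    have hhy : h ≤ y := (List.isChain_cons_cons.mp hc).1
    rcases List.mem_cons.mp hx with rfl | hx2
    · exact le_refl _
    · exact le_trans hhy (ih y (List.isChain_cons_cons.mp hc).2 x hx2)

theorem chain_adj (nums : List Int) (j : Nat) (hc : List.IsChain (· ≤ ·) nums)
    (hj : 1 ≤ j) (hlt : j < nums.length) :
    nums.getD (j - 1) 0 ≤ nums.getD j 0 := by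
  have h1 : (j - 1) + 1 < nums.length := by omega
  have := (List.isChain_iff_getElem.mp hc) (j - 1) h1
  rw [List.getD_eq_getElem nums 0 (by omega), List.getD_eq_getElem nums 0 hlt]
  convert this using 2
  omega

theorem loopA : ∀ (d : Nat) (nums : List Int) (j : Nat), d + j = nums.length → 1 ≤ j →
    List.IsChain (· ≤ ·) nums → ∀ (p : Int), nums.getD (j - 1) 0 = p → 1 ≤ p → ∀ (acc : List Int),
    ((PySem.List.pyRange (j : Int) (nums.length : Int) 1).foldl
      (fun (st : List Int × (Int × Int × Int × Int)) i =>
        let incr := PySem.List.pyGetD nums i 0 - PySem.List.pyGetD nums (i - 1) 0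
        let m := mat_mul (fib_matrix_exp_mod incr) st.2
        (st.1 ++ [m.1], m))
      (acc, mform (p - 1).toNat)).1
    = acc ++ ((nums.drop j).map (fun x => fm x.toNat)) := by
  intro d
  induction d with
  | zero =>
    intro nums j hd hj hc p hp hp1 acc
    have hjlen : j = nums.length := by omega
    rw [PySem.List.pyRange_one_eq_nil (by exact_mod_cast le_of_eq hjlen.symm)]
    simp [List.drop_eq_nil_of_le (le_of_eq hjlen.symm)]
  | succ d ih =>
    intro nums j hd hj hc p hp hp1 acc
    have hlt : j < nums.length := by omega
    rw [PySem.List.pyRange_one_cons (by exact_mod_cast hlt)]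
    rw [List.foldl_cons]
    have hcast : ((j : Int) - 1) = ((j - 1 : Nat) : Int) := by omega
    simp only [PySem.List.pyGetD_natCast, hcast]
    rw [hp]
    set q := nums.getD j 0 with hq
    have hpq : p ≤ q := hp ▸ chain_adj nums j hc hj hlt
    have hstep : fib_matrix_exp_mod (q - p) = mform (q - p).toNat := by
      rw [fib_matrix_exp_mod, if_neg (by omega), matExpNat_eq]
    have hmm : mat_mul (mform (q - p).toNat) (mform (p - 1).toNat) = mform (q - 1).toNat := by
      rw [mform_mul]
      congr 1
      omega
    simp only [hstep, hmm]
    have hfirst : (mform (q - 1).toNat).1 = fm q.toNat := by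
      simp only [mform]
      congr 1
      omega
    have hq1 : (1 : Int) ≤ q := le_trans hp1 hpq
    have hcast2 : ((j : Int) + 1) = (((j + 1 : Nat)) : Int) := by omega
    rw [hcast2]
    rw [ih nums (j + 1) (by omega) (by omega) hc q (by simpa using hq.symm) hq1]
    rw [hfirst]
    have hdrop : nums.drop j = nums[j] :: nums.drop (j + 1) := List.drop_eq_getElem_cons hlt
    have hqe : nums[j] = q := by rw [hq, List.getD_eq_getElem nums 0 hlt]
    rw [hdrop, hqe, List.map_cons, List.append_assoc]
    rfl

theorem alt_eq (nums : List Int) (hall : ∀ x ∈ nums, (1:Int) ≤ x) :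
    fib_incr_alt nums = nums.map (fun x => fm x.toNat) := by
  unfold fib_incr_alt
  apply List.map_congr_left
  intro x hx
  have h1 : (1:Int) ≤ x := hall x hx
  rw [fibPairI, if_neg (by omega), fibPair_eq]

-- ===== VERDICT (by name: the statement is the Claim_ definition above) =====
theorem fib_incr_spec : Claim_equal_fib_incr := by
  intro nums _ hpre
  obtain ⟨hne, hhead, hchain⟩ := hpre
  unfold Spec_fib_incr
  obtain ⟨h, t, rfl⟩ : ∃ h t, nums = h :: t := by
    cases nums with
    | nil => exact absurd rfl hne
    | cons h t => exact ⟨h, t, rfl⟩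
  have hh : (1 : Int) ≤ h := by simpa using hhead
  rw [alt_eq _ (fun x hx => le_trans hh (chain_head_le t h hchain x hx))]
  unfold fib_incr
  rw [PySem.List.pyGet?_zero_cons]
  simp only
  have hm : fib_matrix_exp_mod (h - 1) = mform (h - 1).toNat := by
    rw [fib_matrix_exp_mod, if_neg (by omega), matExpNat_eq]
  rw [hm]
  have hfirst : (mform (h - 1).toNat).1 = fm h.toNat := by
    simp only [mform]; congr 1; omega
  rw [hfirst]
  have := loopA (h :: t).length.pred (h :: t) 1 (by simp) (le_refl 1) hchain h (by simp) hh
    [fm h.toNat]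
  simpa using this
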